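-- pv_equiv track=rewrite | github.com/ryan-reid/BT-BKDiff | scripts/d2lib/services.py | get_granular_group
-- ===== SOURCE A (Python) =====
-- def get_granular_group(category: str) -> str:
--     cat_lower = category.lower()
--     # Weapons
--     if any(cls in cat_lower for cls in ['amazon', 'assassin', 'orb', 'hand to hand', 'grimoire']): return 'Class Weapons'
--     if 'axe' in cat_lower: return 'Axes'
--     if 'bow' in cat_lower: return 'Bows'
--     if 'crossbow' in cat_lower: return 'Crossbows'
--     if 'dagger' in cat_lower or 'knife' in cat_lower: return 'Daggers'
--     if 'javelin' in cat_lower: return 'Javelins'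
--     if 'mace' in cat_lower or 'club' in cat_lower or 'hammer' in cat_lower: return 'Maces'
--     if 'polearm' in cat_lower: return 'Polearms'
--     if 'scepter' in cat_lower: return 'Scepters'
--     if 'spear' in cat_lower: return 'Spears'
--     if 'staff' in cat_lower: return 'Staves'
--     if 'sword' in cat_lower: return 'Swords'
--     if 'throwing' in cat_lower: return 'Throwing'
--     if 'wand' in cat_lower: return 'Wands'
--
--     # Others
--     if any(cls in cat_lower for cls in ['voodoo', 'pelt', 'primal', 'auric']): return 'Class Armors'
--     if 'amulet' in cat_lower: return 'Amulets'
--     if 'ring' in cat_lower: return 'Rings'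
--     if 'charm' in cat_lower: return 'Charms'
--     if 'jewel' in cat_lower: return 'Jewels'
--     if any(h in cat_lower for h in ['helm', 'circlet', 'merc']): return 'Helms'
--     if any(c in cat_lower for c in ['armor', 'tors']): return 'Chests'
--     if 'shield' in cat_lower: return 'Shields'
--     if 'glove' in cat_lower: return 'Gloves'
--     if 'belt' in cat_lower: return 'Belts'
--     if 'boot' in cat_lower: return 'Boots'
--
--     return 'Others'
-- ===== SOURCE B (Python) =====
-- # Position-scan classifier: instead of testing each keyword with `in` in a
-- # branch chain, walk the lowered string once position by position, test which
-- # keywords start at each position, and keep the match of minimum priority.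
--
-- _KEYWORDS = [
--     ('amazon', 0), ('assassin', 0), ('orb', 0), ('hand to hand', 0), ('grimoire', 0),
--     ('axe', 1), ('bow', 2), ('crossbow', 3), ('dagger', 4), ('knife', 4),
--     ('javelin', 5), ('mace', 6), ('club', 6), ('hammer', 6), ('polearm', 7),
--     ('scepter', 8), ('spear', 9), ('staff', 10), ('sword', 11), ('throwing', 12),
--     ('wand', 13), ('voodoo', 14), ('pelt', 14), ('primal', 14), ('auric', 14),
--     ('amulet', 15), ('ring', 16), ('charm', 17), ('jewel', 18), ('helm', 19),
--     ('circlet', 19), ('merc', 19), ('armor', 20), ('tors', 20), ('shield', 21),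
--     ('glove', 22), ('belt', 23), ('boot', 24),
-- ]
--
-- _GROUPS = ['Class Weapons', 'Axes', 'Bows', 'Crossbows', 'Daggers', 'Javelins',
--            'Maces', 'Polearms', 'Scepters', 'Spears', 'Staves', 'Swords',
--            'Throwing', 'Wands', 'Class Armors', 'Amulets', 'Rings', 'Charms',
--            'Jewels', 'Helms', 'Chests', 'Shields', 'Gloves', 'Belts', 'Boots']
--
-- def get_granular_group(category: str) -> str:
--     s = category.lower()
--     best = len(_GROUPS)
--     for i in range(len(s)):
--         for k, p in _KEYWORDS:
--             if p < best and s[i:i + len(k)] == k: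
--                 best = p
--     return _GROUPS[best] if best < len(_GROUPS) else 'Others'
-- ===== Notes on version B (the rewrite author's own statement) =====
-- stated objective: alternative
-- what changed: Instead of a chain of per-keyword substring-containment branches, B scans the lowered string position by position, tests which keywords start at each position via a fixed-window slice compare, and keeps the minimum-priority match, finally indexing a group table.
import Mathlib
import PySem

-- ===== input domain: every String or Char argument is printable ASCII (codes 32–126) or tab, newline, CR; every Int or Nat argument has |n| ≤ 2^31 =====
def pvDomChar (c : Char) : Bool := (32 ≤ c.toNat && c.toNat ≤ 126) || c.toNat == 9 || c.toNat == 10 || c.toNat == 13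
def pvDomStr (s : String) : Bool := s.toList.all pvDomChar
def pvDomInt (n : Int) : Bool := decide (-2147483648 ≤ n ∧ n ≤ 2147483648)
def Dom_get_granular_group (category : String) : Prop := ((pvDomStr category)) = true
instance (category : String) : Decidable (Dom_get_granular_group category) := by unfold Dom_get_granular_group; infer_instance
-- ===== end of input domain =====

-- B replaces A's chain of per-keyword containment branches by a position scan of the
-- lowered string: at each index it slice-compares which keywords start there and keeps
-- the minimum-priority match (objective: alternative; same cost).

-- ===== PORT A =====
def get_granular_group (category : String) : String :=
  let catLower := PySem.Str.lower category
  if (["amazon", "assassin", "orb", "hand to hand", "grimoire"].any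
      (fun cls => PySem.Str.isIn cls catLower)) then "Class Weapons"
  else if PySem.Str.isIn "axe" catLower then "Axes"
  else if PySem.Str.isIn "bow" catLower then "Bows"
  else if PySem.Str.isIn "crossbow" catLower then "Crossbows"
  else if PySem.Str.isIn "dagger" catLower || PySem.Str.isIn "knife" catLower then "Daggers"
  else if PySem.Str.isIn "javelin" catLower then "Javelins"
  else if PySem.Str.isIn "mace" catLower || PySem.Str.isIn "club" catLower
          || PySem.Str.isIn "hammer" catLower then "Maces"
  else if PySem.Str.isIn "polearm" catLower then "Polearms"
  else if PySem.Str.isIn "scepter" catLower then "Scepters"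
  else if PySem.Str.isIn "spear" catLower then "Spears"
  else if PySem.Str.isIn "staff" catLower then "Staves"
  else if PySem.Str.isIn "sword" catLower then "Swords"
  else if PySem.Str.isIn "throwing" catLower then "Throwing"
  else if PySem.Str.isIn "wand" catLower then "Wands"
  else if (["voodoo", "pelt", "primal", "auric"].any
      (fun cls => PySem.Str.isIn cls catLower)) then "Class Armors"
  else if PySem.Str.isIn "amulet" catLower then "Amulets"
  else if PySem.Str.isIn "ring" catLower then "Rings"
  else if PySem.Str.isIn "charm" catLower then "Charms"
  else if PySem.Str.isIn "jewel" catLower then "Jewels"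
  else if (["helm", "circlet", "merc"].any
      (fun h => PySem.Str.isIn h catLower)) then "Helms"
  else if (["armor", "tors"].any
      (fun c => PySem.Str.isIn c catLower)) then "Chests"
  else if PySem.Str.isIn "shield" catLower then "Shields"
  else if PySem.Str.isIn "glove" catLower then "Gloves"
  else if PySem.Str.isIn "belt" catLower then "Belts"
  else if PySem.Str.isIn "boot" catLower then "Boots"
  else "Others"

-- ===== PORT B =====
-- Source B's _KEYWORDS table: (keyword, priority)
def pvKEYWORDS : List (String × Int) :=
  [ ("amazon", 0), ("assassin", 0), ("orb", 0), ("hand to hand", 0), ("grimoire", 0),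
    ("axe", 1), ("bow", 2), ("crossbow", 3), ("dagger", 4), ("knife", 4),
    ("javelin", 5), ("mace", 6), ("club", 6), ("hammer", 6), ("polearm", 7),
    ("scepter", 8), ("spear", 9), ("staff", 10), ("sword", 11), ("throwing", 12),
    ("wand", 13), ("voodoo", 14), ("pelt", 14), ("primal", 14), ("auric", 14),
    ("amulet", 15), ("ring", 16), ("charm", 17), ("jewel", 18), ("helm", 19),
    ("circlet", 19), ("merc", 19), ("armor", 20), ("tors", 20), ("shield", 21),
    ("glove", 22), ("belt", 23), ("boot", 24) ]

-- Source B's _GROUPS table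
def pvGROUPS : List String :=
  [ "Class Weapons", "Axes", "Bows", "Crossbows", "Daggers", "Javelins",
    "Maces", "Polearms", "Scepters", "Spears", "Staves", "Swords",
    "Throwing", "Wands", "Class Armors", "Amulets", "Rings", "Charms",
    "Jewels", "Helms", "Chests", "Shields", "Gloves", "Belts", "Boots" ]

def get_granular_group_alt (category : String) : String :=
  let s := PySem.Str.lower category
  let best : Int :=
    (PySem.List.pyRange 0 (PySem.Str.len s) 1).foldl
      (fun best i =>
        pvKEYWORDS.foldl
          (fun best kp =>
            if kp.2 < best &&
               (PySem.Str.slice s (some i) (some (i + (PySem.Str.len kp.1 : Int))) == kp.1)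
            then kp.2 else best)
          best)
      (pvGROUPS.length : Int)
  if best < (pvGROUPS.length : Int)
  then (PySem.List.pyGet? pvGROUPS best).getD "Others"
  else "Others"

-- ===== PRECONDITION & SPEC =====
def Spec_get_granular_group (category : String) (out : String) : Prop := out = get_granular_group_alt category
instance (category : String) (out : String) : Decidable (Spec_get_granular_group category out) := by unfold Spec_get_granular_group; infer_instance

-- ===== CLAIM (what is proved, stated in full; the proofs are below) =====
def Claim_equal_get_granular_group : Prop := ∀ (category : String), Dom_get_granular_group category → Spec_get_granular_group category (get_granular_group category)

-- ===== LEMMAS AND PROOFS =====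

-- the rule keyword lists, in A's branch order (rule j has priority j in pvKEYWORDS)
def pvRULEKWS : List (List String) :=
  [ ["amazon", "assassin", "orb", "hand to hand", "grimoire"],
    ["axe"], ["bow"], ["crossbow"], ["dagger", "knife"], ["javelin"],
    ["mace", "club", "hammer"], ["polearm"], ["scepter"], ["spear"],
    ["staff"], ["sword"], ["throwing"], ["wand"],
    ["voodoo", "pelt", "primal", "auric"],
    ["amulet"], ["ring"], ["charm"], ["jewel"],
    ["helm", "circlet", "merc"], ["armor", "tors"],
    ["shield"], ["glove"], ["belt"], ["boot"] ]

-- the per-rule hit vector of a (lowered) string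
def pvHits (s : String) : List Bool :=
  pvRULEKWS.map (fun kws => kws.any (fun k => PySem.Str.isIn k s))

-- A's chain, generically
def pvChain : List Bool → List String → String
  | b :: bs, g :: gs => if b then g else pvChain bs gs
  | _, _ => "Others"

lemma pvChain_eq_findIdx (bs : List Bool) (gs : List String) (h : bs.length = gs.length) :
    pvChain bs gs = gs.getD (bs.findIdx id) "Others" := by
  induction bs generalizing gs with
  | nil => cases gs with
    | nil => rfl
    | cons g gs => simp at h
  | cons b bs ih =>
    cases gs with
    | nil => simp at h
    | cons g gs =>
      cases b with
      | true => simp [pvChain, List.findIdx_cons]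
      | false =>
        have h' := ih gs (by simpa using h)
        simp [pvChain, List.findIdx_cons, h']

-- foldl over a fold-of-folds is a foldl over the flattened list
lemma pvFoldl_flat {α β : Type} (l : List α) (g : α → List β) (f : Int → β → Int) (init : Int) :
    l.foldl (fun b i => (g i).foldl f b) init = (l.flatMap g).foldl f init := by
  induction l generalizing init with
  | nil => rfl
  | cons x xs ih => simp [List.flatMap_cons, List.foldl_append, ih]

-- window match at position i (on char lists)
def pvMatchAt (l : List Char) (i : Int) (k : List Char) : Prop :=
  PySem.List.slice l (some i) (some (i + (k.length : Int))) = k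

-- a window match somewhere ↔ substring containment (k ≠ [])
lemma pvWindow_iff (l k : List Char) (hk : k ≠ []) :
    (∃ i ∈ PySem.List.pyRange 0 (l.length : Int) 1, pvMatchAt l i k) ↔
      PySem.Chars.isIn k l = true := by
  constructor
  · rintro ⟨i, hi, hm⟩
    rw [PySem.List.mem_pyRange_one] at hi
    obtain ⟨h0, _⟩ := hi
    rw [← PySem.Chars.exists_prefix_drop_iff_isIn]
    refine ⟨i.toNat, ?_⟩
    unfold pvMatchAt at hm
    have : i = ((i.toNat : Nat) : Int) := by omega
    rw [this] at hm
    have : ((i.toNat : Nat) : Int) + (k.length : Int) = ((i.toNat + k.length : Nat) : Int) := by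
      push_cast; ring
    rw [this, PySem.List.slice_natCast] at hm
    have : i.toNat + k.length - i.toNat = k.length := by omega
    rw [this] at hm
    rw [← hm]
    exact List.take_prefix _ _
  · intro h
    rw [← PySem.Chars.exists_prefix_drop_iff_isIn] at h
    obtain ⟨j, hj⟩ := h
    -- wlog j < l.length: since k ≠ [] and k <+: l.drop j, drop j is nonempty
    have hlen : k.length ≤ (l.drop j).length := hj.length_le
    have hjlt : j < l.length := by
      rcases k with _ | ⟨c, k'⟩
      · exact absurd rfl hk
      · simp [List.length_drop] at hlen; omega
    refine ⟨(j : Int), ?_, ?_⟩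
    · rw [PySem.List.mem_pyRange_one]; constructor <;> [positivity; exact_mod_cast hjlt]
    · unfold pvMatchAt
      have : ((j : Nat) : Int) + (k.length : Int) = ((j + k.length : Nat) : Int) := by push_cast; ring
      rw [this, PySem.List.slice_natCast]
      have : j + k.length - j = k.length := by omega
      rw [this]
      exact (List.prefix_iff_eq_take.mp hj).symm

-- the min-fold over matched priorities, characterised
lemma pvFoldl_min_le {β : Type} (l : List β) (f : β → Int) (init : Int) :
    (l.foldl (fun b x => min b (f x)) init) ≤ init ∧
      ∀ x ∈ l, (l.foldl (fun b x => min b (f x)) init) ≤ f x := by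
  induction l generalizing init with
  | nil => simp
  | cons y ys ih =>
    obtain ⟨h1, h2⟩ := ih (min init (f y))
    refine ⟨le_trans h1 (min_le_left _ _), ?_⟩
    intro x hx
    rcases List.mem_cons.mp hx with h | h
    · subst h; exact le_trans h1 (min_le_right _ _)
    · exact h2 x h

lemma pvFoldl_min_mem {β : Type} (l : List β) (f : β → Int) (init : Int) :
    (l.foldl (fun b x => min b (f x)) init) = init ∨
      ∃ x ∈ l, (l.foldl (fun b x => min b (f x)) init) = f x := by
  induction l generalizing init with
  | nil => left; rfl
  | cons y ys ih =>
    rcases ih (min init (f y)) with h | ⟨x, hx, hfx⟩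
    · simp only [List.foldl_cons, h]
      rcases min_cases init (f y) with ⟨he, _⟩ | ⟨he, _⟩
      · left; exact he
      · right; exact ⟨y, List.mem_cons_self, he⟩
    · right; exact ⟨x, List.mem_cons_of_mem _ hx, hfx⟩

-- the minimum over matched priorities is the first-hit index
lemma pvMin_eq_findIdx (bs : List Bool) (V : Int)
    (h1 : V = (bs.length : Int) ∨ ∃ j : Nat, j < bs.length ∧ bs.getD j false = true ∧ V = (j : Int))
    (h2 : ∀ j : Nat, j < bs.length → bs.getD j false = true → V ≤ (j : Int)) :
    V = (bs.findIdx id : Int) := by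
  by_cases hall : ∀ j : Nat, j < bs.length → bs.getD j false = false
  · have hfi : bs.findIdx id = bs.length := by
      rw [List.findIdx_eq_length]
      intro x hx
      obtain ⟨j, hj, rfl⟩ := List.mem_iff_getElem.mp hx
      have := hall j hj
      simpa [List.getD, List.getElem?_eq_getElem hj] using this
    rw [hfi]
    rcases h1 with h | ⟨j, hj, hbj, rfl⟩
    · exact h
    · have := hall j hj; rw [this] at hbj; exact absurd hbj (by simp)
  · push_neg at hall
    obtain ⟨m, hm, hbm⟩ := hall
    have hbm' : bs.getD m false = true := by
      cases h : bs.getD m false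
      · exact absurd h hbm
      · rfl
    have hfi_lt : bs.findIdx id < bs.length := by
      apply List.findIdx_lt_length_of_exists
      refine ⟨bs[m], List.getElem_mem _, ?_⟩
      simpa [List.getD, List.getElem?_eq_getElem hm] using hbm'
    set F := bs.findIdx id with hF
    have hbF : bs.getD F false = true := by
      have := List.findIdx_getElem (p := id) (xs := bs) (w := hfi_lt)
      simpa [List.getD, List.getElem?_eq_getElem hfi_lt] using this
    have hVF : V ≤ (F : Int) := h2 F hfi_lt hbF
    rcases h1 with h | ⟨j, hj, hbj, rfl⟩
    · omega
    · have hFj : F ≤ j := by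
        by_contra hlt
        push_neg at hlt
        have hfalse : bs.getD j false = false := by
          have h0 := List.not_of_lt_findIdx (p := id) (xs := bs) (h := hlt)
          simp only [id] at h0
          simpa [List.getD, List.getElem?_eq_getElem hj] using h0
        rw [hfalse] at hbj
        exact absurd hbj (by simp)
      omega

-- finite facts about the literal tables
lemma pvKw_ne_nil : ∀ kp ∈ pvKEYWORDS, kp.1.toList ≠ [] := by decide

lemma pvPrio_bound : ∀ kp ∈ pvKEYWORDS, 0 ≤ kp.2 ∧ kp.2 < 25 := by decide

lemma pvKw_in_rule : ∀ kp ∈ pvKEYWORDS, kp.1 ∈ pvRULEKWS.getD kp.2.toNat [] := by decide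

lemma pvRule_in_kw : ∀ j : Nat, j < 25 → ∀ kw ∈ pvRULEKWS.getD j [], (kw, (j : Int)) ∈ pvKEYWORDS := by decide

lemma pvHits_length (s : String) : (pvHits s).length = 25 := by
  simp [pvHits, pvRULEKWS]

lemma pvHits_getD (s : String) (j : Nat) (hj : j < 25) :
    (pvHits s).getD j false = (pvRULEKWS.getD j []).any (fun k => PySem.Str.isIn k s) := by
  have hlen : j < pvRULEKWS.length := by
    have : pvRULEKWS.length = 25 := by rfl
    omega
  simp [pvHits, List.getD, List.getElem?_map, List.getElem?_eq_getElem hlen]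

-- the flattened candidate list of the position scan
def pvCands (s : String) : List (String × Int) :=
  (PySem.List.pyRange 0 (PySem.Str.len s) 1).flatMap
    (fun i => pvKEYWORDS.filter
      (fun kp => PySem.Str.slice s (some i) (some (i + (PySem.Str.len kp.1 : Int))) == kp.1))

-- membership in the candidate list is exactly substring containment
lemma pvMemCands (s : String) (kp : String × Int) :
    kp ∈ pvCands s ↔ kp ∈ pvKEYWORDS ∧ PySem.Str.isIn kp.1 s = true := by
  unfold pvCands
  rw [List.mem_flatMap]
  constructor
  · rintro ⟨i, hi, hmem⟩
    rw [List.mem_filter] at hmem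
    obtain ⟨hk, he⟩ := hmem
    refine ⟨hk, ?_⟩
    have he' : (PySem.Str.slice s (some i) (some (i + (PySem.Str.len kp.1 : Int)))).toList
        = kp.1.toList := by
      rw [beq_iff_eq] at he
      rw [he]
    rw [PySem.Str.isIn_eq, ← pvWindow_iff _ _ (pvKw_ne_nil kp hk)]
    refine ⟨i, ?_, ?_⟩
    · simpa using hi
    · unfold pvMatchAt
      simpa using he'
  · rintro ⟨hk, hin⟩
    rw [PySem.Str.isIn_eq, ← pvWindow_iff _ _ (pvKw_ne_nil kp hk)] at hin
    obtain ⟨i, hi, hm⟩ := hin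
    refine ⟨i, by simpa using hi, ?_⟩
    rw [List.mem_filter]
    refine ⟨hk, ?_⟩
    rw [beq_iff_eq]
    unfold pvMatchAt at hm
    apply String.toList_injective
    simpa using hm

-- the port's double fold IS the min-fold over the candidate list
lemma pvBest_eq (s : String) :
    (PySem.List.pyRange 0 (PySem.Str.len s) 1).foldl
      (fun best i =>
        pvKEYWORDS.foldl
          (fun best kp =>
            if kp.2 < best &&
               (PySem.Str.slice s (some i) (some (i + (PySem.Str.len kp.1 : Int))) == kp.1)
            then kp.2 else best)
          best)
      (pvGROUPS.length : Int)
    = (pvCands s).foldl (fun b kp => min b kp.2) (pvGROUPS.length : Int) := by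
  have hinner : ∀ (i : Int) (b : Int),
      pvKEYWORDS.foldl
        (fun best kp =>
          if kp.2 < best &&
             (PySem.Str.slice s (some i) (some (i + (PySem.Str.len kp.1 : Int))) == kp.1)
          then kp.2 else best) b
      = (pvKEYWORDS.filter
          (fun kp => PySem.Str.slice s (some i) (some (i + (PySem.Str.len kp.1 : Int))) == kp.1)).foldl
          (fun b kp => min b kp.2) b := by
    intro i b
    rw [PySem.List.foldl_congr_mem
      (g := fun b kp =>
        if PySem.Str.slice s (some i) (some (i + (PySem.Str.len kp.1 : Int))) == kp.1
        then min b kp.2 else b)]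
    · exact PySem.List.foldl_if_eq_foldl_filter
        (p := fun (kp : String × Int) => PySem.Str.slice s (some i) (some (i + (PySem.Str.len kp.1 : Int))) == kp.1)
        (f := fun (b : Int) (kp : String × Int) => min b kp.2)
        pvKEYWORDS b
    · intro acc kp _
      by_cases h2 : (PySem.Str.slice s (some i) (some (i + (PySem.Str.len kp.1 : Int))) == kp.1) = true
      · rw [if_pos h2]
        by_cases hlt : kp.2 < acc
        · rw [if_pos (by rw [Bool.and_eq_true, decide_eq_true_eq]; exact ⟨hlt, h2⟩),
            min_def, if_neg (by omega)]
        · rw [if_neg (by rw [Bool.and_eq_true, decide_eq_true_eq]; exact fun h => hlt h.1),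
            min_def, if_pos (by omega)]
      · rw [if_neg h2, if_neg (by rw [Bool.and_eq_true]; exact fun h => h2 h.2)]
  calc (PySem.List.pyRange 0 (PySem.Str.len s) 1).foldl
        (fun best i =>
          pvKEYWORDS.foldl
            (fun best kp =>
              if kp.2 < best &&
                 (PySem.Str.slice s (some i) (some (i + (PySem.Str.len kp.1 : Int))) == kp.1)
              then kp.2 else best)
            best)
        (pvGROUPS.length : Int)
      = (PySem.List.pyRange 0 (PySem.Str.len s) 1).foldl
        (fun b i =>
          ((pvKEYWORDS.filter
            (fun kp => PySem.Str.slice s (some i) (some (i + (PySem.Str.len kp.1 : Int))) == kp.1)).foldl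
            (fun b kp => min b kp.2) b))
        (pvGROUPS.length : Int) := by
        apply PySem.List.foldl_congr_mem
        intro acc i _
        exact hinner i acc
    _ = (pvCands s).foldl (fun b kp => min b kp.2) (pvGROUPS.length : Int) := by
        unfold pvCands
        exact pvFoldl_flat _ _ _ _

-- B's port computes the group of the first-hit rule
lemma pvAlt_eq (category : String) :
    get_granular_group_alt category
      = pvGROUPS.getD ((pvHits (PySem.Str.lower category)).findIdx id) "Others" := by
  unfold get_granular_group_alt
  set s := PySem.Str.lower category with hs
  simp only []
  rw [pvBest_eq s]
  have hVmin := pvFoldl_min_le (pvCands s) (·.2) (pvGROUPS.length : Int)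
  have hVmem := pvFoldl_min_mem (pvCands s) (·.2) (pvGROUPS.length : Int)
  set V := (pvCands s).foldl (fun b kp => min b kp.2) (pvGROUPS.length : Int) with hV
  have hGlen : (pvGROUPS.length : Int) = 25 := by rfl
  have hVfind : V = ((pvHits s).findIdx id : Int) := by
    apply pvMin_eq_findIdx
    · rcases hVmem with h | ⟨kp, hkp, hfx⟩
      · left; rw [pvHits_length, h, hGlen]; norm_num
      · right
        rw [pvMemCands] at hkp
        obtain ⟨hk, hhit⟩ := hkp
        obtain ⟨hp0, hp25⟩ := pvPrio_bound kp hk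
        refine ⟨kp.2.toNat, ?_, ?_, by omega⟩
        · rw [pvHits_length]; omega
        · rw [pvHits_getD s _ (by omega)]
          rw [List.any_eq_true]
          exact ⟨kp.1, pvKw_in_rule kp hk, hhit⟩
    · intro j hj hbj
      rw [pvHits_length] at hj
      rw [pvHits_getD s j hj, List.any_eq_true] at hbj
      obtain ⟨kw, hkw, hhit⟩ := hbj
      have hmem : (kw, (j : Int)) ∈ pvCands s := by
        rw [pvMemCands]
        exact ⟨pvRule_in_kw j hj kw hkw, hhit⟩
      have := hVmin.2 _ hmem
      simpa using this
  rw [hVfind]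
  have hfle : (pvHits s).findIdx id ≤ 25 := by
    have := List.findIdx_le_length (p := id) (xs := pvHits s)
    rw [pvHits_length] at this
    exact this
  by_cases hlt : (pvHits s).findIdx id < 25
  · rw [if_pos (by rw [hGlen]; exact_mod_cast hlt)]
    have hlt' : (pvHits s).findIdx id < pvGROUPS.length := by
      have : pvGROUPS.length = 25 := by rfl
      omega
    rw [PySem.List.pyGet?_natCast]
    simp [List.getD, List.getElem?_eq_getElem hlt']
  · rw [if_neg (by rw [hGlen]; exact_mod_cast hlt)]
    have hfe : (pvHits s).findIdx id = 25 := by omega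
    have : pvGROUPS.length = 25 := by rfl
    rw [List.getD, List.getElem?_eq_none (by omega)]
    rfl

-- A's port is the generic chain over the hit vector
lemma pvA_eq (category : String) :
    get_granular_group category = pvChain (pvHits (PySem.Str.lower category)) pvGROUPS := by
  simp only [get_granular_group, pvHits, pvRULEKWS, pvGROUPS, List.map_cons, List.map_nil,
    pvChain, List.any_cons, List.any_nil, Bool.or_false, Bool.or_assoc]

-- ===== VERDICT (by name: the statement is the Claim_ definition above) =====
theorem get_granular_group_spec : Claim_equal_get_granular_group := by
  intro category _
  unfold Spec_get_granular_group
  rw [pvA_eq, pvAlt_eq, pvChain_eq_findIdx]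
  rw [pvHits_length]
  rfl
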